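-- pv_equiv track=rewrite | github.com/BondonMickael/M_xanthus-E_coli-Predation | IntegrationMethods/PulpIntegration/methods/utils/iMAT_utils.py | filter_gpr
-- ===== SOURCE A (Python) =====
-- def filter_gpr(gpr_rule, ignore_human=False):
--     """'
--     Filters gpr rules from human/mouse genes/
--
--     Args:
--     ------
--     gpr_rule: cobra.core.gene.GPR
--         gpr rule from cobra model
--     ignore_hum: Boolean
--         if True drops ENSMUS genes.
--
--     Returns:
--     ------
--     filtered_gpr: str
--         Filtered gpr expression
--     """
--     gpr_rule = str(gpr_rule)
--     tokens = gpr_rule.split(" ")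
--     if ignore_human:
--         prefix = "ENSG"
--     else:
--         prefix = "ENSMUS"
--     indices_to_remove = set()
--     for i in range(len(tokens) - 1, -1, -1):
--         if prefix in tokens[i]:
--             indices_to_remove.update({i - 1, i, i + 1})
--
--     tokens = [tok for idx, tok in enumerate(tokens) if idx not in indices_to_remove]
--     if tokens and tokens[-1].lower() == "or":
--         tokens = tokens[:-1]
--     filtered_gpr = " ".join(tokens)
--
--     return filtered_gpr
-- ===== SOURCE B (Python) =====
-- def filter_gpr(gpr_rule, ignore_human=False):
--     gpr_rule = str(gpr_rule)
--     prefix = "ENSG" if ignore_human else "ENSMUS"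
--     # Online state machine over the token stream: a one-token look-behind
--     # buffer ('pending') delays emission until the next token is known safe,
--     # and 'skip' drops the right neighbor of a matching gene token.
--     kept = []
--     pending = None
--     skip = False
--     for tok in gpr_rule.split(" "):
--         if prefix in tok:
--             pending = None   # left neighbor of a gene: discard it
--             skip = True      # and drop the right neighbor too
--         elif skip:
--             skip = False     # this token is a gene's right neighbor: drop it
--         else:
--             if pending is not None:
--                 kept.append(pending)
--             pending = tok
--     if pending is not None:
--         kept.append(pending)
--     if kept and kept[-1].lower() == "or":
--         kept.pop()
--     return " ".join(kept)
-- ===== Notes on version B (the rewrite author's own statement) =====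
-- stated objective: alternative
-- what changed: Replaces A's backward scatter of matching indices into an indices_to_remove set plus a second enumerate-and-filter pass with a single online state machine over the token stream: a one-token look-behind buffer delays emission until the next token is seen and a skip flag drops a gene's right neighbor; no index arithmetic or auxiliary set is used.
import Mathlib
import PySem

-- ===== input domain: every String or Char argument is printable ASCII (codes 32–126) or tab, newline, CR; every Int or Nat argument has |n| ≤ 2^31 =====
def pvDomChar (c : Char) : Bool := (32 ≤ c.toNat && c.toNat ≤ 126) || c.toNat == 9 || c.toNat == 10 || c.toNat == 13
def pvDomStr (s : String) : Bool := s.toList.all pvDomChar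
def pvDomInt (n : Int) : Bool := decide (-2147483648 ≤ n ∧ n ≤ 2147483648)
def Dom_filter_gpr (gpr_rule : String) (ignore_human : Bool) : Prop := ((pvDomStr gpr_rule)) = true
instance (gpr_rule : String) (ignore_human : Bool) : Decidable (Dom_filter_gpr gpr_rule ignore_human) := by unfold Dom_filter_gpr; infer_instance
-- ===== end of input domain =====

-- B replaces A's backward scatter into an index set (plus an enumerate-filter pass) by a single
-- online state machine with a one-token look-behind buffer and a skip flag (simpler decomposition, same cost).

-- ===== PORT A =====
-- str.split(" ") with nonempty separator: split? returns some; .getD [] is exact here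
def filter_gpr (gpr_rule : String) (ignore_human : Bool) : String :=
  let tokens := (PySem.Str.split? gpr_rule " ").getD []
  let pfx := if ignore_human then "ENSG" else "ENSMUS"
  let idxs : PySem.Set Int :=
    (PySem.List.pyRange ((tokens.length : Int) - 1) (-1) (-1)).foldl
      (fun s i =>
        if PySem.Str.isIn pfx (PySem.List.pyGetD tokens i "") then
          PySem.Set.update s [i - 1, i, i + 1]
        else s)
      PySem.Set.empty
  let tokens2 := ((PySem.List.enumerate tokens).filter
      (fun p => !(PySem.Set.contains idxs p.1))).map (·.2)
  let tokens3 := match tokens2.getLast? with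
    | some t => if PySem.Str.lower t = "or" then tokens2.dropLast else tokens2
    | none => tokens2
  PySem.Str.join " " tokens3

-- ===== PORT B =====
-- streaming fold: state = (kept tokens, pending one-token look-behind buffer, skip flag)
def filter_gpr_alt (gpr_rule : String) (ignore_human : Bool) : String :=
  let pfx := if ignore_human then "ENSG" else "ENSMUS"
  let st := ((PySem.Str.split? gpr_rule " ").getD []).foldl
    (fun (st : List String × Option String × Bool) tok =>
      if PySem.Str.isIn pfx tok then (st.1, none, true)
      else if st.2.2 then (st.1, none, false)
      else (st.1 ++ st.2.1.toList, some tok, false))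
    ([], none, false)
  let kept := st.1 ++ st.2.1.toList
  let kept2 := match kept.getLast? with
    | some t => if PySem.Str.lower t = "or" then kept.dropLast else kept
    | none => kept
  PySem.Str.join " " kept2

-- ===== PRECONDITION & SPEC =====
def Spec_filter_gpr (gpr_rule : String) (ignore_human : Bool) (out : String) : Prop := out = filter_gpr_alt gpr_rule ignore_human
instance (gpr_rule : String) (ignore_human : Bool) (out : String) : Decidable (Spec_filter_gpr gpr_rule ignore_human out) := by unfold Spec_filter_gpr; infer_instance

-- ===== CLAIM (what is proved, stated in full; the proofs are below) =====
def Claim_equal_filter_gpr : Prop := ∀ (gpr_rule : String) (ignore_human : Bool), Dom_filter_gpr gpr_rule ignore_human → Spec_filter_gpr gpr_rule ignore_human (filter_gpr gpr_rule ignore_human)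

-- ===== LEMMAS AND PROOFS =====

-- head-marked test
def pvHM (mark : String → Bool) : List String → Bool
  | [] => false
  | u :: _ => mark u

-- window filter carrying the "previous token marked" flag
def pvWK (mark : String → Bool) (b : Bool) : List String → List String
  | [] => []
  | t :: r => (if b || mark t || pvHM mark r then [] else [t]) ++ pvWK mark (mark t) r

-- denotation of B's streaming fold from state (pending, skip)
def pvG (mark : String → Bool) : Option String → Bool → List String → List String
  | p, _, [] => p.toList
  | p, s, t :: r =>
    if mark t then pvG mark none true r
    else if s then pvG mark none false r
    else p.toList ++ pvG mark (some t) false r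

theorem foldl_g (mark : String → Bool) (L : List String) :
    ∀ (kept : List String) (p : Option String) (s : Bool),
    ((L.foldl
        (fun (st : List String × Option String × Bool) tok =>
          if mark tok then (st.1, none, true)
          else if st.2.2 then (st.1, none, false)
          else (st.1 ++ st.2.1.toList, some tok, false))
        (kept, p, s)).1 ++
     (L.foldl
        (fun (st : List String × Option String × Bool) tok =>
          if mark tok then (st.1, none, true)
          else if st.2.2 then (st.1, none, false)
          else (st.1 ++ st.2.1.toList, some tok, false))
        (kept, p, s)).2.1.toList) = kept ++ pvG mark p s L := by
  induction L with
  | nil => intro kept p s; simp [pvG]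
  | cons t r ih =>
    intro kept p s
    cases h : mark t with
    | true => simp [List.foldl_cons, h, pvG, ih]
    | false =>
      cases s with
      | true => simp [List.foldl_cons, h, pvG, ih]
      | false => simp [List.foldl_cons, h, pvG, ih]

theorem g_wk (mark : String → Bool) (L : List String) :
    (pvG mark none true L = pvWK mark true L) ∧
    (pvG mark none false L = pvWK mark false L) ∧
    (∀ t, mark t = false →
      pvG mark (some t) false L = (if pvHM mark L then [] else [t]) ++ pvWK mark false L) := by
  induction L with
  | nil => simp [pvG, pvWK, pvHM]
  | cons u r ih =>
    obtain ⟨ih1, ih2, ih3⟩ := ih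
    cases hu : mark u with
    | true =>
      refine ⟨by simp [pvG, pvWK, hu, ih1], by simp [pvG, pvWK, hu, ih1],
        fun t ht => by simp [pvG, pvWK, pvHM, hu, ih1]⟩
    | false =>
      refine ⟨by simp [pvG, pvWK, hu, ih2], ?_, ?_⟩
      · simp [pvG, pvWK, pvHM, hu, ih3 u hu]
      · intro t ht
        simp [pvG, pvWK, pvHM, hu, ih3 u hu]

-- A-side index-set machinery (characterizes A's kept list as a window filterMap)
theorem mem_fold_update (P : Int → Bool) (L : List Int) (s0 : PySem.Set Int) (x : Int) :
    x ∈ L.foldl (fun s i => if P i then PySem.Set.update s [i - 1, i, i + 1] else s) s0 ↔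
      x ∈ s0 ∨ ∃ i ∈ L, P i = true ∧ (x = i - 1 ∨ x = i ∨ x = i + 1) := by
  induction L generalizing s0 with
  | nil => simp
  | cons a L ih =>
    simp only [List.foldl_cons]
    by_cases h : P a = true
    · simp only [h, if_true, ih, PySem.Set.mem_update, List.mem_cons,
        List.not_mem_nil, or_false]
      aesop
    · simp only [h, ih, List.mem_cons]
      aesop

theorem filter_map_congr {α β : Type} (l : List α) (p q : α → Bool) (f g : α → β)
    (h1 : ∀ x ∈ l, p x = q x) (h2 : ∀ x ∈ l, f x = g x) :
    (l.filter p).map f = (l.filter q).map g := by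
  induction l with
  | nil => rfl
  | cons a l ih =>
    have hp := h1 a (List.mem_cons_self)
    have ih' := ih (fun x hx => h1 x (List.mem_cons_of_mem _ hx)) (fun x hx => h2 x (List.mem_cons_of_mem _ hx))
    by_cases h : p a = true <;>
      simp [h, ← hp, ih', h2 a List.mem_cons_self]

theorem filterMap_if_none (q : Nat → Bool) (f : Nat → String) (L : List Nat) :
    L.filterMap (fun j => if q j then none else some (f j)) =
      (L.filter (fun j => !q j)).map f := by
  induction L with
  | nil => rfl
  | cons a L ih =>
    by_cases h : q a = true <;> simp [h, ih]

theorem kept_eq (tokens : List String) (pfx : String) :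
    ((PySem.List.enumerate tokens).filter
        (fun p => !(PySem.Set.contains
          ((PySem.List.pyRange ((tokens.length : Int) - 1) (-1) (-1)).foldl
            (fun s i =>
              if PySem.Str.isIn pfx (PySem.List.pyGetD tokens i "") then
                PySem.Set.update s [i - 1, i, i + 1]
              else s)
            PySem.Set.empty) p.1))).map (·.2) =
    (List.range tokens.length).filterMap (fun j =>
      if PySem.Str.isIn pfx (tokens.getD j "") ||
         (decide (0 < j) && PySem.Str.isIn pfx (tokens.getD (j - 1) "")) ||
         (decide (j + 1 < tokens.length) && PySem.Str.isIn pfx (tokens.getD (j + 1) ""))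
      then none else some (tokens.getD j "")) := by
  rw [filterMap_if_none, PySem.List.enumerate_eq_map_pyRange tokens "",
    PySem.List.pyRange_one]
  simp only [List.filter_map, List.map_map, sub_zero, PySem.List.len, Int.toNat_natCast]
  apply filter_map_congr
  · intro j hj
    rw [List.mem_range] at hj
    simp only [Function.comp_apply, zero_add, Bool.not_inj_iff]
    rw [Bool.eq_iff_iff, PySem.Set.contains_iff, mem_fold_update]
    have hget : ∀ i : Int, 0 ≤ i → PySem.List.pyGetD tokens i "" = tokens.getD i.toNat "" :=
      fun i hi => PySem.List.pyGetD_of_nonneg tokens "" hi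
    constructor
    · rintro (hs | ⟨i, hi, hPi, hx⟩)
      · simp [PySem.Set.empty] at hs
      · rw [PySem.List.mem_pyRange_neg_one] at hi
        rw [hget i (by omega)] at hPi
        rcases hx with hx | hx | hx
        · have hl : j + 1 < tokens.length := by omega
          have : i.toNat = j + 1 := by omega
          rw [this] at hPi
          simp at hPi
          simp_all
        · have : i.toNat = j := by omega
          rw [this] at hPi
          simp at hPi
          simp_all
        · have h0 : 0 < j := by omega
          have : i.toNat = j - 1 := by omega
          rw [this] at hPi
          simp at hPi
          simp_all
    · intro h
      rw [Bool.or_assoc, Bool.or_eq_true, Bool.or_eq_true] at h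
      rcases h with h | h | h
      · exact Or.inr ⟨(j : Int), by rw [PySem.List.mem_pyRange_neg_one]; omega,
          by rw [hget _ (by omega)]; simpa using h, by omega⟩
      · rw [Bool.and_eq_true, decide_eq_true_iff] at h
        exact Or.inr ⟨((j : Int) - 1), by rw [PySem.List.mem_pyRange_neg_one]; omega,
          by rw [hget _ (by omega)]
             have : ((j : Int) - 1).toNat = j - 1 := by omega
             rw [this]; exact h.2, by omega⟩
      · rw [Bool.and_eq_true, decide_eq_true_iff] at h
        exact Or.inr ⟨((j : Int) + 1), by rw [PySem.List.mem_pyRange_neg_one]; omega,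
          by rw [hget _ (by omega)]
             have : ((j : Int) + 1).toNat = j + 1 := by omega
             rw [this]; exact h.2, by omega⟩
  · intro j hj
    rw [List.mem_range] at hj
    simp [PySem.List.pyGetD_of_nonneg tokens "" (by omega : (0:Int) ≤ (j:Int))]

-- the window filterMap (with virtual left-neighbor flag b) equals the recursive window filter pvWK
theorem range_wk (mark : String → Bool) :
    ∀ (ts : List String) (b : Bool),
    (List.range ts.length).filterMap (fun j =>
      if (mark (ts.getD j "") ||
          (decide (0 < j) && mark (ts.getD (j - 1) "")) ||
          (decide (j + 1 < ts.length) && mark (ts.getD (j + 1) ""))) ||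
          (decide (j = 0) && b)
      then none else some (ts.getD j "")) = pvWK mark b ts := by
  intro ts
  induction ts with
  | nil => intro b; simp [pvWK]
  | cons t r ih =>
    intro b
    rw [List.length_cons, List.range_succ_eq_map, List.filterMap_cons, List.filterMap_map]
    have hcond0 : ((mark ((t :: r).getD 0 "") ||
          (decide ((0:Nat) < 0) && mark ((t :: r).getD (0 - 1) "")) ||
          (decide (0 + 1 < r.length + 1) && mark ((t :: r).getD (0 + 1) ""))) ||
          (decide ((0:Nat) = 0) && b))
        = (b || mark t || pvHM mark r) := by
      cases r with
      | nil => cases b <;> cases ht : mark t <;> simp [pvHM, ht]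
      | cons u r' => cases b <;> cases ht : mark t <;> cases hu : mark u <;>
          simp [pvHM, ht, hu]
    have htail : (List.range r.length).filterMap
        ((fun j =>
          if (mark ((t :: r).getD j "") ||
              (decide (0 < j) && mark ((t :: r).getD (j - 1) "")) ||
              (decide (j + 1 < r.length + 1) && mark ((t :: r).getD (j + 1) ""))) ||
              (decide (j = 0) && b)
          then none else some ((t :: r).getD j "")) ∘ Nat.succ)
        = pvWK mark (mark t) r := by
      rw [← ih (mark t)]
      apply List.filterMap_congr
      intro j hj
      rw [List.mem_range] at hj
      simp only [Function.comp_apply, Nat.succ_eq_add_one]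
      have e1 : (t :: r).getD (j + 1) "" = r.getD j "" := by simp
      have e2 : (t :: r).getD (j + 1 - 1) "" = (t :: r).getD j "" := by simp
      have e3 : (t :: r).getD (j + 1 + 1) "" = r.getD (j + 1) "" := by simp
      rw [e1, e2, e3]
      have hcond : ((mark (r.getD j "") ||
            (decide (0 < j + 1) && mark ((t :: r).getD j "")) ||
            (decide (j + 1 + 1 < r.length + 1) && mark (r.getD (j + 1) ""))) ||
            (decide (j + 1 = 0) && b))
          = ((mark (r.getD j "") ||
            (decide (0 < j) && mark (r.getD (j - 1) "")) ||
            (decide (j + 1 < r.length) && mark (r.getD (j + 1) ""))) ||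
            (decide (j = 0) && mark t)) := by
        rw [Bool.eq_iff_iff]
        cases j with
        | zero =>
          simp only [List.getD_cons_zero, Bool.or_eq_true, Bool.and_eq_true,
            decide_eq_true_iff]
          simp only [Nat.lt_irrefl, false_and, or_false, Nat.zero_lt_succ, true_and,
            Nat.succ_ne_zero, Nat.add_lt_add_iff_right]
          try tauto
        | succ k =>
          simp only [List.getD_cons_succ, Bool.or_eq_true, Bool.and_eq_true,
            decide_eq_true_iff]
          simp only [Nat.add_lt_add_iff_right, Nat.succ_ne_zero, false_and, or_false,
            Nat.zero_lt_succ, true_and, Nat.add_sub_cancel]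
          try tauto
      rw [hcond]
    rw [hcond0, htail]
    cases hb : (b || mark t || pvHM mark r) with
    | true => simp [pvWK, hb]
    | false => simp [pvWK, hb]

-- ===== VERDICT (by name: the statement is the Claim_ definition above) =====
theorem filter_gpr_spec : Claim_equal_filter_gpr := by
  intro gpr_rule ignore_human _
  unfold Spec_filter_gpr filter_gpr filter_gpr_alt
  simp only []
  set tokens := (PySem.Str.split? gpr_rule " ").getD [] with htok
  set pfx := (if ignore_human then "ENSG" else "ENSMUS") with hpfx
  have hB := foldl_g (fun t => PySem.Str.isIn pfx t) tokens [] none false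
  simp only [List.nil_append] at hB
  have hwk := (g_wk (fun t => PySem.Str.isIn pfx t) tokens).2.1
  have hrange := range_wk (fun t => PySem.Str.isIn pfx t) tokens false
  have hA := kept_eq tokens pfx
  have hconds : (List.range tokens.length).filterMap (fun j =>
      if PySem.Str.isIn pfx (tokens.getD j "") ||
         (decide (0 < j) && PySem.Str.isIn pfx (tokens.getD (j - 1) "")) ||
         (decide (j + 1 < tokens.length) && PySem.Str.isIn pfx (tokens.getD (j + 1) ""))
      then none else some (tokens.getD j "")) =
      (List.range tokens.length).filterMap (fun j =>
      if (PySem.Str.isIn pfx (tokens.getD j "") ||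
         (decide (0 < j) && PySem.Str.isIn pfx (tokens.getD (j - 1) "")) ||
         (decide (j + 1 < tokens.length) && PySem.Str.isIn pfx (tokens.getD (j + 1) ""))) ||
         (decide (j = 0) && false)
      then none else some (tokens.getD j "")) := by
    apply List.filterMap_congr; intro j _; simp
  rw [hA, hconds, hrange, ← hwk, ← hB]
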